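-- pv_equiv track=rewrite | github.com/theAntiYeti/PEMDASParsing | main.py | get_operator
-- ===== SOURCE A (Python) =====
-- from typing import List, Union, Optional
--
-- PRECEDENCE={'^': 0, '*': 1, '/': 2, '+': 3, '-': 4}
--
-- def get_operator(tokens: List[str]) -> int:
--     """Returns the last, lowest precedence operator"""
--     out = None
--     current_prec = -1
--
--     for i in range(len(tokens)-1, -1, -1): # Goes backwards to ensure the last entry is found.
--         if tokens[i] in PRECEDENCE and (new_prec := PRECEDENCE[tokens[i]]) > current_prec:
--             out = i
--             current_prec = new_prec
--
--     return out
-- ===== SOURCE B (Python) =====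
-- PRECEDENCE={'^': 0, '*': 1, '/': 2, '+': 3, '-': 4}
--
-- def get_operator(tokens):
--     """Returns the last, lowest precedence operator"""
--     present = [PRECEDENCE[t] for t in tokens if t in PRECEDENCE]
--     if not present:
--         return None
--     target = max(present)
--     out = None
--     for i, t in enumerate(tokens):
--         if PRECEDENCE.get(t) == target:
--             out = i
--     return out
-- ===== Notes on version B (the rewrite author's own statement) =====
-- stated objective: alternative
-- what changed: A's single backward scan with a running (best index, best precedence) pair is replaced by a two-pass decomposition: first collect the precedences present and take their max, then a forward pass that keeps the last index whose precedence equals that max.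
import Mathlib
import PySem

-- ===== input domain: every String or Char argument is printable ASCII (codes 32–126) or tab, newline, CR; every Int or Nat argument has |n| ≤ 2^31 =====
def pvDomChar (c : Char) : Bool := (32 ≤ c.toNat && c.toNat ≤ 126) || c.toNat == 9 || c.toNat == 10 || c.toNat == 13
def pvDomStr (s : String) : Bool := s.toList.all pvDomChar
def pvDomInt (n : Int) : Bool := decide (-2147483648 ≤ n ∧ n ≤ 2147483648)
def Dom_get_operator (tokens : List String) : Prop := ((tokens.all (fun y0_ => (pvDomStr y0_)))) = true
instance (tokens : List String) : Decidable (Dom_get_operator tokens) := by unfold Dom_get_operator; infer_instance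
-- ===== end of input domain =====

-- B replaces A's single backward running-best scan with a two-pass decomposition
-- (collect precedences, take the max, then a forward pass keeping the last matching index); objective: alternative.


def PRECEDENCE : PySem.Dict String Int :=
  PySem.Dict.ofList [("^", 0), ("*", 1), ("/", 2), ("+", 3), ("-", 4)]

-- ===== PORT A =====
-- backward index loop `for i in range(len(tokens)-1, -1, -1)` carrying (out, current_prec)
def get_operator (tokens : List String) : Option Int :=
  let r := (PySem.List.pyRange ((PySem.List.len tokens) - 1) (-1) (-1)).foldl
    (fun (st : Option Int × Int) i =>
      match PySem.Dict.get? PRECEDENCE (PySem.List.pyGetD tokens i "") with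
      | some new_prec => if new_prec > st.2 then (some i, new_prec) else st
      | none => st)
    (none, -1)
  r.1

-- ===== PORT B =====
-- two passes: the precedences present, their max, then a forward last-match scan
def get_operator_alt (tokens : List String) : Option Int :=
  let present := tokens.filterMap (fun t => PySem.Dict.get? PRECEDENCE t)
  match PySem.List.max? present (fun x => x) with
  | none => none
  | some target =>
      (PySem.List.enumerate tokens 0).foldl
        (fun (out : Option Int) (p : Int × String) =>
          if PySem.Dict.get? PRECEDENCE p.2 = some target then some p.1 else out)
        none

-- ===== PRECONDITION & SPEC =====
def Spec_get_operator (tokens : List String) (out : Option Int) : Prop := out = get_operator_alt tokens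
instance (tokens : List String) (out : Option Int) : Decidable (Spec_get_operator tokens out) := by unfold Spec_get_operator; infer_instance

-- ===== CLAIM (what is proved, stated in full; the proofs are below) =====
def Claim_equal_get_operator : Prop := ∀ (tokens : List String), Dom_get_operator tokens → Spec_get_operator tokens (get_operator tokens)

-- ===== LEMMAS AND PROOFS =====

-- A's backward loop as structural recursion on the token list (indices start at s)
def refA : List String → Int → Option Int × Int
  | [], _ => (none, -1)
  | t :: ts, s =>
    let r := refA ts (s + 1)
    match PySem.Dict.get? PRECEDENCE t with
    | some p => if p > r.2 then (some s, p) else r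
    | none => r

theorem prec_nonneg (t : String) (p : Int) (h : PySem.Dict.get? PRECEDENCE t = some p) : 0 ≤ p := by
  simp only [PRECEDENCE, show PySem.Dict.ofList [("^", (0:Int)), ("*", 1), ("/", 2), ("+", 3), ("-", 4)] = PySem.Dict.mk [("^", 0), ("*", 1), ("/", 2), ("+", 3), ("-", 4)] from rfl, PySem.Dict.get?_mk_cons] at h
  split_ifs at h <;> simp [PySem.Dict.get?] at h <;> omega

-- A = foldr over enumerate = refA
theorem foldr_enum_eq_refA (ts : List String) (s : Int) :
    (PySem.List.enumerate ts s).foldr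
      (fun (p : Int × String) (st : Option Int × Int) =>
        match PySem.Dict.get? PRECEDENCE p.2 with
        | some q => if q > st.2 then (some p.1, q) else st
        | none => st) (none, -1) = refA ts s := by
  induction ts generalizing s with
  | nil => simp [PySem.List.enumerate_nil, refA]
  | cons t ts ih => simp [PySem.List.enumerate_cons, refA, ih]

theorem get_operator_eq_refA (tokens : List String) :
    get_operator tokens = (refA tokens 0).1 := by
  unfold get_operator
  rw [show PySem.List.pyRange ((PySem.List.len tokens) - 1) (-1) (-1)
        = (PySem.List.pyRange 0 (PySem.List.len tokens) 1).reverse from by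
      rw [PySem.List.pyRange_neg_one_eq_reverse]; norm_num]
  rw [List.foldl_reverse]
  rw [← foldr_enum_eq_refA tokens 0,
      PySem.List.enumerate_eq_map_pyRange (d := ""), List.foldr_map]

-- the forward last-match foldl: a non-none init just feeds through
theorem foldl_last_shift (m : Int) (ts : List String) :
    ∀ (s : Int) (o : Option Int),
    (PySem.List.enumerate ts s).foldl
      (fun (out : Option Int) (p : Int × String) =>
        if PySem.Dict.get? PRECEDENCE p.2 = some m then some p.1 else out) o
    = match (PySem.List.enumerate ts s).foldl
        (fun (out : Option Int) (p : Int × String) =>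
          if PySem.Dict.get? PRECEDENCE p.2 = some m then some p.1 else out) none with
      | some j => some j
      | none => o := by
  induction ts with
  | nil => intro s o; simp [PySem.List.enumerate_nil]
  | cons t ts ih =>
    intro s o
    simp only [PySem.List.enumerate_cons, List.foldl_cons]
    by_cases h : PySem.Dict.get? PRECEDENCE t = some m
    · simp only [h, if_pos]
      rw [ih (s+1) (some s)]
      cases (PySem.List.enumerate ts (s+1)).foldl _ (none : Option Int) <;> simp
    · simp only [if_neg h]
      exact ih (s+1) o

theorem foldl_last_none_iff (m : Int) (ts : List String) (s : Int) :
    (PySem.List.enumerate ts s).foldl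
      (fun (out : Option Int) (p : Int × String) =>
        if PySem.Dict.get? PRECEDENCE p.2 = some m then some p.1 else out) none = none
    ↔ ∀ t ∈ ts, PySem.Dict.get? PRECEDENCE t ≠ some m := by
  induction ts generalizing s with
  | nil => simp [PySem.List.enumerate_nil]
  | cons t ts ih =>
    simp only [PySem.List.enumerate_cons, List.foldl_cons, List.mem_cons]
    by_cases h : PySem.Dict.get? PRECEDENCE t = some m
    · simp only [h, if_pos]
      rw [foldl_last_shift]
      cases hf : (PySem.List.enumerate ts (s+1)).foldl _ (none : Option Int) <;>
        simp [h]
    · simp only [if_neg h]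
      rw [ih (s+1)]
      constructor
      · intro hall x hx; rcases hx with rfl | hx
        · exact h
        · exact hall x hx
      · intro hall x hx; exact hall x (Or.inr hx)

theorem foldl_max_assoc (t : List Int) : ∀ (a b : Int), t.foldl max (max a b) = max a (t.foldl max b) := by
  induction t with
  | nil => intro a b; simp
  | cons c t ih =>
    intro a b
    simp only [List.foldl_cons]
    rw [max_assoc, ih]

-- main bridge: refA equals B's two-pass computation
theorem refA_eq_alt (ts : List String) : ∀ (s : Int),
    refA ts s =
    match PySem.List.max? (ts.filterMap (fun t => PySem.Dict.get? PRECEDENCE t)) (fun x => x) with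
    | none => (none, -1)
    | some m =>
        ((PySem.List.enumerate ts s).foldl
          (fun (out : Option Int) (p : Int × String) =>
            if PySem.Dict.get? PRECEDENCE p.2 = some m then some p.1 else out) none, m) := by
  induction ts with
  | nil => intro s; simp [refA, PySem.List.max?]
  | cons t ts ih =>
    intro s
    simp only [refA, List.filterMap_cons]
    cases hp : PySem.Dict.get? PRECEDENCE t with
    | none =>
      rw [ih (s+1)]
      cases hm : PySem.List.max? (ts.filterMap (fun t => PySem.Dict.get? PRECEDENCE t)) (fun x => x) <;>
        simp [PySem.List.enumerate_cons, hp]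
    | some p =>
      have hp0 : 0 ≤ p := prec_nonneg t p hp
      rw [ih (s+1)]
      cases hm : PySem.List.max? (ts.filterMap (fun t => PySem.Dict.get? PRECEDENCE t)) (fun x => x) with
      | none =>
        have hrest : ts.filterMap (fun t => PySem.Dict.get? PRECEDENCE t) = [] :=
          (PySem.List.max?_eq_none_iff _ _).mp hm
        have hnone : ∀ t' ∈ ts, PySem.Dict.get? PRECEDENCE t' = none :=
          List.filterMap_eq_nil_iff.mp hrest
        rw [hrest]
        simp only [PySem.List.max?_id_cons, List.foldl_nil]
        have hif : p > (-1 : Int) := by omega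
        simp only [hif, if_pos]
        simp only [PySem.List.enumerate_cons, List.foldl_cons, hp, if_pos]
        rw [foldl_last_shift]
        have : (PySem.List.enumerate ts (s+1)).foldl
            (fun (out : Option Int) (q : Int × String) =>
              if PySem.Dict.get? PRECEDENCE q.2 = some p then some q.1 else out) none = none := by
          rw [foldl_last_none_iff]
          intro t' ht' hc
          rw [hnone t' ht'] at hc; simp at hc
        rw [this]
      | some q =>
        -- facts about q
        have hqmem : q ∈ ts.filterMap (fun t => PySem.Dict.get? PRECEDENCE t) :=
          PySem.List.max?_mem hm
        have hqmax : ∀ y ∈ ts.filterMap (fun t => PySem.Dict.get? PRECEDENCE t), y ≤ q := by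
          intro y hy; exact PySem.List.max?_isMax hm y hy
        obtain ⟨x, tl, hxtl⟩ : ∃ x tl, ts.filterMap (fun t => PySem.Dict.get? PRECEDENCE t) = x :: tl := by
          cases hts : ts.filterMap (fun t => PySem.Dict.get? PRECEDENCE t) with
          | nil => rw [hts] at hqmem; exact absurd hqmem (List.not_mem_nil)
          | cons x tl => exact ⟨x, tl, rfl⟩
        have hfoldq : tl.foldl max x = q := by
          have h2 := hm; rw [hxtl, PySem.List.max?_id_cons] at h2; injection h2
        have hfold' : List.foldl max p (x :: tl) = max p q := by
          rw [List.foldl_cons, foldl_max_assoc, hfoldq]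
        rw [hxtl, PySem.List.max?_id_cons, hfold']
        dsimp only
        by_cases hpq : p > q
        · have hmx : max p q = p := max_eq_left (le_of_lt hpq)
          rw [hmx]
          simp only [hpq, if_pos]
          simp only [PySem.List.enumerate_cons, List.foldl_cons, hp, if_pos]
          rw [foldl_last_shift]
          have : (PySem.List.enumerate ts (s+1)).foldl
              (fun (out : Option Int) (r : Int × String) =>
                if PySem.Dict.get? PRECEDENCE r.2 = some p then some r.1 else out) none = none := by
            rw [foldl_last_none_iff]
            intro t' ht' hc
            have : p ∈ ts.filterMap (fun t => PySem.Dict.get? PRECEDENCE t) :=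
              List.mem_filterMap.mpr ⟨t', ht', hc⟩
            exact absurd (hqmax p this) (by omega)
          rw [this]
        · have hmx : max p q = q := max_eq_right (by omega)
          rw [hmx]
          simp only [if_neg hpq]
          simp only [PySem.List.enumerate_cons, List.foldl_cons]
          have hsome : ∃ j, (PySem.List.enumerate ts (s+1)).foldl
              (fun (out : Option Int) (r : Int × String) =>
                if PySem.Dict.get? PRECEDENCE r.2 = some q then some r.1 else out) none = some j := by
            obtain ⟨t', ht', hq'⟩ := List.mem_filterMap.mp hqmem
            cases hJ : (PySem.List.enumerate ts (s+1)).foldl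
              (fun (out : Option Int) (r : Int × String) =>
                if PySem.Dict.get? PRECEDENCE r.2 = some q then some r.1 else out) none with
            | none => exact absurd hq' ((foldl_last_none_iff q ts (s+1)).mp hJ t' ht')
            | some j => exact ⟨j, rfl⟩
          obtain ⟨j, hJ⟩ := hsome
          by_cases hpq2 : p = q
          · subst hpq2
            simp only [hp, if_pos]
            rw [foldl_last_shift p ts (s+1) (some s), hJ]
          · have : ¬ (PySem.Dict.get? PRECEDENCE t = some q) := by
              rw [hp]; intro hc; exact hpq2 (by injection hc)
            simp only [hp] at this ⊢
            simp only [if_neg this]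

-- ===== VERDICT (by name: the statement is the Claim_ definition above) =====
theorem get_operator_spec : Claim_equal_get_operator := by
  intro tokens _
  unfold Spec_get_operator get_operator_alt
  rw [get_operator_eq_refA, refA_eq_alt tokens 0]
  cases h : PySem.List.max? (tokens.filterMap (fun t => PySem.Dict.get? PRECEDENCE t)) (fun x => x) <;>
    simp [h]
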